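-- pv_equiv track=rewrite | github.com/miliar/Code_Jam_Webscraper | solutions_python/solutions_year17_round0_nr3/30.py | solve
-- ===== SOURCE A (Python) =====
-- from heapq import heappush, heappop, heapify
--
-- class PQ(list):
-- 	def __init__(self, *args, **kwargs):
-- 		super().__init__(*args, **kwargs)
-- 		heapify(self)
--
-- 	def push(self, item):
-- 		heappush(self, item)
--
-- 	def pop(self):
-- 		return heappop(self)
--
-- def solve(n, k):
-- 	sc = {n: 1}
-- 	pq = PQ([-n])
--
-- 	left = k
--
-- 	while True:
-- 		n = -pq.pop()
-- 		c = sc[n]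
--
-- 		left -= c
-- 		if left <= 0:
-- 			return (n // 2, n // 2) if n & 1 else (n // 2, n // 2 - 1)
--
-- 		if n & 1:
-- 			child = n // 2
-- 			if child not in sc:
-- 				sc[child] = 0
-- 				pq.push(-child)
-- 			sc[child] += 2 * c
-- 		else:
-- 			child1 = n // 2 - 1
-- 			child2 = n // 2
-- 			if child1 not in sc:
-- 				sc[child1] = 0
-- 				pq.push(-child1)
-- 			if child2 not in sc:
-- 				sc[child2] = 0
-- 				pq.push(-child2)
-- 			sc[child1] += c
-- 			sc[child2] += c
-- ===== SOURCE B (Python) =====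
-- def solve(n, k):
--     # max-dict re-implementation: keep only {gap length: count}; no heap, no
--     # separate seen-set -- pop the max key outright each round.
--     d = {n: 1}
--     while True:
--         hi = max(d)
--         c = d.pop(hi)
--         k -= c
--         if k <= 0:
--             h = hi // 2
--             return (h, h) if hi % 2 else (h, h - 1)
--         if hi % 2:
--             d[hi // 2] = d.get(hi // 2, 0) + 2 * c
--         else:
--             d[hi // 2 - 1] = d.get(hi // 2 - 1, 0) + c
--             d[hi // 2] = d.get(hi // 2, 0) + c
-- ===== Notes on version B (the rewrite author's own statement) =====
-- stated objective: simpler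
-- what changed: Dropped the heap and the separate seen/count bookkeeping: B keeps a single {gap length: count} dict, each round pops its max key outright and folds the child lengths back in with accumulated weights.
-- outside the precondition, e.g. on solve(2, 6): A returns (-1, -1), B returns (0, -1); on solve(3, 50): A raises IndexError, B returns (0, -1)
import Mathlib
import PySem

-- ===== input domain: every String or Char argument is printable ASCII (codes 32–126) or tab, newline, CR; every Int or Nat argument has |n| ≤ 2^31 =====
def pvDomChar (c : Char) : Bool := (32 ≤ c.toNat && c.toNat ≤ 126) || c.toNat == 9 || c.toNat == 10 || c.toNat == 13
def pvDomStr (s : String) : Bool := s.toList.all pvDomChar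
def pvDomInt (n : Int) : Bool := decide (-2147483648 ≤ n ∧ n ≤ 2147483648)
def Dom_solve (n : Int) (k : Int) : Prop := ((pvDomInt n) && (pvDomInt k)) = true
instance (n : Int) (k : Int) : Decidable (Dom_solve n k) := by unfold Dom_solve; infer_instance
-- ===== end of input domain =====

-- B drops A's heap + seen/count bookkeeping for a single {length: count} dict popped at its
-- max key (objective: simpler); equal return values proved on Pre_solve.

-- ===== PORT A =====
-- The heap is modeled by its contract: heappush adds an element, heappop removes the minimum.
-- The loop's fuel exceeds the number of iterations on every input the claim covers; on fuel
-- exhaustion / empty heap (Python: IndexError, outside Pre_) a default (0, 0) is returned.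
def solveLoopA (fuel : Nat) (pq : List Int) (sc : PySem.Dict Int Int) (left : Int) : Int × Int :=
  match fuel with
  | 0 => (0, 0)
  | fuel + 1 =>
    match PySem.List.min? pq (fun x => x) with
    | none => (0, 0)  -- pq.pop() on an empty heap raises IndexError; outside Pre_
    | some m =>
      let n := -m
      let pq1 := pq.erase m
      let c := sc.getD n 0  -- sc[n]; the key is present whenever -n was pushed
      let left1 := left - c
      if left1 ≤ 0 then
        if PySem.Int.mod n 2 = 1 then (PySem.Int.floordiv n 2, PySem.Int.floordiv n 2)
        else (PySem.Int.floordiv n 2, PySem.Int.floordiv n 2 - 1)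
      else
        if PySem.Int.mod n 2 = 1 then
          let child := PySem.Int.floordiv n 2
          let sc1 := if sc.contains child then sc else sc.insert child 0
          let pq2 := if sc.contains child then pq1 else pq1 ++ [-child]
          solveLoopA fuel pq2 (sc1.insert child (sc1.getD child 0 + 2 * c)) left1
        else
          let child1 := PySem.Int.floordiv n 2 - 1
          let child2 := PySem.Int.floordiv n 2
          let sc1 := if sc.contains child1 then sc else sc.insert child1 0
          let pq2 := if sc.contains child1 then pq1 else pq1 ++ [-child1]
          let sc2 := if sc1.contains child2 then sc1 else sc1.insert child2 0
          let pq3 := if sc1.contains child2 then pq2 else pq2 ++ [-child2]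
          let sc3 := sc2.insert child1 (sc2.getD child1 0 + c)
          solveLoopA fuel pq3 (sc3.insert child2 (sc3.getD child2 0 + c)) left1

def solve (n : Int) (k : Int) : Int × Int :=
  solveLoopA (n.natAbs + k.natAbs + 4) [-n] (PySem.Dict.ofList [(n, 1)]) k

-- ===== PORT B =====
def solveLoopB (fuel : Nat) (d : PySem.Dict Int Int) (k : Int) : Int × Int :=
  match fuel with
  | 0 => (0, 0)
  | fuel + 1 =>
    match PySem.List.max? d.keys (fun x => x) with
    | none => (0, 0)  -- max() of an empty dict raises ValueError; outside Pre_
    | some hi =>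
      match d.pop? hi with
      | none => (0, 0)  -- unreachable: hi is a key of d
      | some (c, d1) =>
        let k1 := k - c
        if k1 ≤ 0 then
          let h := PySem.Int.floordiv hi 2
          if PySem.Int.mod hi 2 = 1 then (h, h) else (h, h - 1)
        else
          if PySem.Int.mod hi 2 = 1 then
            let ch := PySem.Int.floordiv hi 2
            solveLoopB fuel (d1.insert ch (d1.getD ch 0 + 2 * c)) k1
          else
            let ch1 := PySem.Int.floordiv hi 2 - 1
            let d2 := d1.insert ch1 (d1.getD ch1 0 + c)
            let ch2 := PySem.Int.floordiv hi 2
            solveLoopB fuel (d2.insert ch2 (d2.getD ch2 0 + c)) k1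

def solve_alt (n : Int) (k : Int) : Int × Int :=
  solveLoopB (n.natAbs + k.natAbs + 4) (PySem.Dict.ofList [(n, 1)]) k

-- ===== PRECONDITION & SPEC =====
-- Pre_ excludes the overfull inputs (k ≥ 2 with k > n): more people than stalls is outside the
-- problem's domain, and there A goes on splitting gaps of length ≤ 0, returning negative-gap
-- tuples or raising IndexError — a corner no one would specify either way.
def Pre_solve (n : Int) (k : Int) : Prop := k ≤ 1 ∨ k ≤ n
instance (n : Int) (k : Int) : Decidable (Pre_solve n k) := by unfold Pre_solve; infer_instance
def pvWitness_solve : Int × Int := (7, 4)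

def Spec_solve (n : Int) (k : Int) (out : Int × Int) : Prop := out = solve_alt n k
instance (n : Int) (k : Int) (out : Int × Int) : Decidable (Spec_solve n k out) := by unfold Spec_solve; infer_instance

-- ===== CLAIM (what is proved, stated in full; the proofs are below) =====
def Claim_equal_solve : Prop := ∀ (n : Int) (k : Int), Dom_solve n k → Pre_solve n k → Spec_solve n k (solve n k)

-- ===== LEMMAS AND PROOFS =====

-- capacity of a state: Σ length·count over the live dict
def capD (d : PySem.Dict Int Int) : Int := (d.keys.map (fun m => m * d.getD m 0)).sum

-- the bisimulation invariant between A's (pq, sc) and B's d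
structure MInv (pq : List Int) (sc : PySem.Dict Int Int) (d : PySem.Dict Int Int) : Prop where
  nodup : pq.Nodup
  mem : ∀ x : Int, x ∈ d.keys ↔ -x ∈ pq
  knodup : d.keys.Nodup
  agree : ∀ x ∈ d.keys, sc.get? x = d.get? x
  nonneg : ∀ x ∈ d.keys, 0 ≤ x
  pos : ∀ x ∈ d.keys, 1 ≤ d.getD x 0
  popped : ∀ m : Int, sc.contains m = true → m ∉ d.keys → ∀ m' ∈ d.keys, m' < m

-- ---- Dict.erase lemmas (not in the prelude) ----
theorem pv_get?_erase (d : PySem.Dict Int Int) (k k' : Int) :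
    (d.erase k).get? k' = if k' = k then none else d.get? k' := by
  rcases d with ⟨items⟩
  induction items with
  | nil => simp [PySem.Dict.erase, PySem.Dict.get?]
  | cons p t ih =>
    by_cases hpk : p.1 = k <;> by_cases hk' : k' = k <;> by_cases hp : p.1 = k' <;>
      simp_all [PySem.Dict.erase, PySem.Dict.get?]

theorem pv_keys_erase (d : PySem.Dict Int Int) (k : Int) :
    (d.erase k).keys = d.keys.filter (fun x => !(x == k)) := by
  rcases d with ⟨items⟩
  simp [PySem.Dict.erase, PySem.Dict.keys, List.filter_map]
  rfl

theorem pv_mem_keys_erase (d : PySem.Dict Int Int) (k k' : Int) :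
    k' ∈ (d.erase k).keys ↔ k' ∈ d.keys ∧ k' ≠ k := by
  simp [pv_keys_erase, List.mem_filter]

theorem pv_nodup_keys_erase (d : PySem.Dict Int Int) (k : Int) (h : d.keys.Nodup) :
    (d.erase k).keys.Nodup := by
  rw [pv_keys_erase]; exact h.filter _

theorem pv_getD_erase_of_ne (d : PySem.Dict Int Int) (k k' : Int) (h : k' ≠ k) :
    (d.erase k).getD k' 0 = d.getD k' 0 := by
  simp [PySem.Dict.getD, pv_get?_erase, h]

-- sum of f over a nodup list splits off any member
theorem pv_sum_map_erase (l : List Int) (f : Int → Int) (a : Int) (ha : a ∈ l) :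
    (l.map f).sum = f a + ((l.erase a).map f).sum := by
  have h := List.perm_cons_erase ha
  have := (h.map f).sum_eq
  simpa using this

theorem pv_sum_pos_mem (l : List Int) (f : Int → Int) (hnn : ∀ x ∈ l, 0 ≤ f x)
    (hpos : 0 < (l.map f).sum) : ∃ x ∈ l, 0 < f x := by
  induction l with
  | nil => simp at hpos
  | cons a t ih =>
    by_cases h : 0 < f a
    · exact ⟨a, by simp, h⟩
    · have ht : 0 < (t.map f).sum := by
        have := hnn a (by simp)
        simp only [List.map_cons, List.sum_cons] at hpos
        omega
      obtain ⟨x, hx, hfx⟩ := ih (fun x hx => hnn x (by simp [hx])) ht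
      exact ⟨x, by simp [hx], hfx⟩

-- capD under erase of a key
theorem pv_capD_erase (d : PySem.Dict Int Int) (hi : Int) (hnd : d.keys.Nodup)
    (hmem : hi ∈ d.keys) :
    capD (d.erase hi) = capD d - hi * d.getD hi 0 := by
  unfold capD
  rw [pv_sum_map_erase d.keys (fun m => m * d.getD m 0) hi hmem]
  rw [hnd.erase_eq_filter hi]
  have : (d.erase hi).keys = d.keys.filter (fun x => x != hi) := by
    rw [pv_keys_erase]; congr 1
  rw [this]
  have hcong : ∀ x ∈ d.keys.filter (fun x => x != hi),
      x * (d.erase hi).getD x 0 = x * d.getD x 0 := by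
    intro x hx
    have hne : x ≠ hi := by
      have := (List.mem_filter.mp hx).2; simpa using this
    rw [pv_getD_erase_of_ne d hi x hne]
  rw [List.map_congr_left hcong]
  ring

-- capD under insert
theorem pv_capD_insert_mem (d : PySem.Dict Int Int) (ch v : Int) (hnd : d.keys.Nodup)
    (hmem : ch ∈ d.keys) :
    capD (d.insert ch v) = capD d - ch * d.getD ch 0 + ch * v := by
  unfold capD
  have hk : (d.insert ch v).keys = d.keys :=
    PySem.Dict.keys_insert_of_contains d v (((PySem.Dict.contains_iff_mem_keys) d ch).mpr hmem)
  rw [hk]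
  rw [pv_sum_map_erase d.keys (fun m => m * (d.insert ch v).getD m 0) ch hmem,
      pv_sum_map_erase d.keys (fun m => m * d.getD m 0) ch hmem]
  have hcong : ∀ x ∈ d.keys.erase ch,
      x * (d.insert ch v).getD x 0 = x * d.getD x 0 := by
    intro x hx
    have hne : x ≠ ch := (hnd.mem_erase_iff.mp hx).1
    rw [PySem.Dict.getD_insert_of_ne d v 0 hne]
  rw [List.map_congr_left hcong, PySem.Dict.getD_insert_self]
  ring

theorem pv_capD_insert_not_mem (d : PySem.Dict Int Int) (ch v : Int)
    (hmem : ch ∉ d.keys) :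
    capD (d.insert ch v) = capD d + ch * v := by
  unfold capD
  have hc : d.contains ch = false := by
    rw [Bool.eq_false_iff]; intro h
    exact hmem (((PySem.Dict.contains_iff_mem_keys) d ch).mp h)
  have hk : (d.insert ch v).keys = d.keys ++ [ch] :=
    PySem.Dict.keys_insert_of_not_contains d v hc
  rw [hk]
  rw [List.map_append, List.sum_append]
  have hcong : ∀ x ∈ d.keys, x * (d.insert ch v).getD x 0 = x * d.getD x 0 := by
    intro x hx
    have hne : x ≠ ch := fun h => hmem (h ▸ hx)
    rw [PySem.Dict.getD_insert_of_ne d v 0 hne]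
  rw [List.map_congr_left hcong]
  simp [PySem.Dict.getD_insert_self]

-- membership in keys via get?
theorem pv_mem_keys_iff_isSome (d : PySem.Dict Int Int) (k : Int) :
    k ∈ d.keys ↔ (d.get? k).isSome = true := by
  rw [← PySem.Dict.contains_iff_mem_keys, PySem.Dict.contains_eq_isSome_get?]

-- max? with identity key is determined by membership
theorem pv_max?_id_of_mem (l : List Int) (m : Int) (hm : m ∈ l)
    (hmax : ∀ y ∈ l, y ≤ m) : PySem.List.max? l (fun x => x) = some m := by
  cases h : PySem.List.max? l (fun x => x) with
  | none => rw [PySem.List.max?_eq_none_iff] at h; subst h; simp at hm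
  | some m' =>
    have h1 : m ≤ m' := PySem.List.max?_isMax h m hm
    have h2 : m' ≤ m := hmax m' (PySem.List.max?_mem h)
    rw [le_antisymm h2 h1]

-- MInv only inspects sc through get?/contains
theorem pv_MInv_sc_ext (pq : List Int) (sc sc' d : PySem.Dict Int Int)
    (hI : MInv pq sc d) (h : ∀ x, sc'.get? x = sc.get? x) : MInv pq sc' d := by
  refine ⟨hI.nodup, hI.mem, hI.knodup, ?_, hI.nonneg, hI.pos, ?_⟩
  · intro x hx; rw [h]; exact hI.agree x hx
  · intro m hm hnk m' hm'
    refine hI.popped m ?_ hnk m' hm'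
    rw [PySem.Dict.contains_eq_isSome_get?] at hm ⊢
    rw [← h]; exact hm

-- popping the maximal key keeps the invariant; popped keys of the rest are ≥ hi
theorem pv_pop_inv (pq : List Int) (sc d : PySem.Dict Int Int) (hi : Int)
    (hI : MInv pq sc d) (hmem : hi ∈ d.keys) (hmax : ∀ x ∈ d.keys, x ≤ hi) :
    MInv (pq.erase (-hi)) sc (d.erase hi) ∧
      (∀ m : Int, sc.contains m = true → m ∉ (d.erase hi).keys → hi ≤ m) := by
  have hpopped : ∀ m : Int, sc.contains m = true → m ∉ (d.erase hi).keys → hi ≤ m := by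
    intro m hc hnk
    rw [pv_mem_keys_erase] at hnk
    by_cases hmhi : m = hi
    · omega
    · have hnm : m ∉ d.keys := by tauto
      exact le_of_lt (hI.popped m hc hnm hi hmem)
  refine ⟨⟨hI.nodup.erase _, ?_, pv_nodup_keys_erase d hi hI.knodup, ?_, ?_, ?_, ?_⟩, hpopped⟩
  · intro x
    rw [pv_mem_keys_erase, hI.nodup.mem_erase_iff, hI.mem x]
    simp only [ne_eq, neg_inj]
    tauto
  · intro x hx
    rw [pv_mem_keys_erase] at hx
    rw [pv_get?_erase, if_neg hx.2]
    exact hI.agree x hx.1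
  · intro x hx; rw [pv_mem_keys_erase] at hx; exact hI.nonneg x hx.1
  · intro x hx
    have hx' := hx; rw [pv_mem_keys_erase] at hx'
    rw [PySem.Dict.getD, pv_get?_erase, if_neg hx'.2, ← PySem.Dict.getD]
    exact hI.pos x hx'.1
  · intro m hc hnk m' hm'
    have hm'' := hm'; rw [pv_mem_keys_erase] at hm''
    have h1 : hi ≤ m := hpopped m hc hnk
    have h2 : m' ≤ hi := hmax m' hm''.1
    have h3 : m' ≠ hi := hm''.2
    by_cases hmhi : m = hi
    · omega
    · have hnm : m ∉ d.keys := by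
        intro hmd
        exact hnk (by rw [pv_mem_keys_erase]; exact ⟨hmd, hmhi⟩)
      exact hI.popped m hc hnm m' hm''.1

-- one child fold preserves the invariant and adds ch·w to the capacity
theorem pv_addchild (pq : List Int) (sc d : PySem.Dict Int Int) (ch w : Int)
    (hI : MInv pq sc d) (hch0 : 0 ≤ ch) (hw : 1 ≤ w)
    (hchpop : ∀ m : Int, sc.contains m = true → m ∉ d.keys → ch < m) :
    MInv (if sc.contains ch then pq else pq ++ [-ch])
      ((if sc.contains ch then sc else sc.insert ch 0).insert ch
        ((if sc.contains ch then sc else sc.insert ch 0).getD ch 0 + w))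
      (d.insert ch (d.getD ch 0 + w)) ∧
      capD (d.insert ch (d.getD ch 0 + w)) = capD d + ch * w ∧
      (∀ m : Int, ((if sc.contains ch then sc else sc.insert ch 0).insert ch
          ((if sc.contains ch then sc else sc.insert ch 0).getD ch 0 + w)).contains m = true →
        m ∉ (d.insert ch (d.getD ch 0 + w)).keys →
        sc.contains m = true ∧ m ∉ d.keys) := by
  have hmemkeys : ∀ m : Int, m ∈ (d.insert ch (d.getD ch 0 + w)).keys ↔ m = ch ∨ m ∈ d.keys :=
    fun m => PySem.Dict.mem_keys_insert ..
  have hcontains : ∀ (sc0 : PySem.Dict Int Int) (v m : Int),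
      (sc0.insert ch v).contains m = true ↔ m = ch ∨ sc0.contains m = true := by
    intro sc0 v m
    rw [PySem.Dict.contains_insert]
    simp [beq_iff_eq]
  have hlast : ∀ m : Int, ((if sc.contains ch then sc else sc.insert ch 0).insert ch
          ((if sc.contains ch then sc else sc.insert ch 0).getD ch 0 + w)).contains m = true →
        m ∉ (d.insert ch (d.getD ch 0 + w)).keys →
        sc.contains m = true ∧ m ∉ d.keys := by
    intro m hc hnk
    rw [hmemkeys] at hnk
    rw [not_or] at hnk
    rw [hcontains] at hc
    rcases hc with h | h
    · exact absurd h hnk.1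
    · split_ifs at h with hg
      · exact ⟨h, hnk.2⟩
      · rw [hcontains] at h
        rcases h with h | h
        · exact absurd h hnk.1
        · exact ⟨h, hnk.2⟩
  by_cases hg : sc.contains ch = true
  · -- child already tracked: it must still be live (in d.keys)
    have hchd : ch ∈ d.keys := by
      by_contra hnd
      exact absurd (hchpop ch hg hnd) (lt_irrefl ch)
    have hgetD : sc.getD ch 0 = d.getD ch 0 := by
      rw [PySem.Dict.getD, PySem.Dict.getD, hI.agree ch hchd]
    simp only [hg, if_true] at hlast ⊢
    refine ⟨⟨hI.nodup, ?_, ?_, ?_, ?_, ?_, ?_⟩, ?_, hlast⟩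
    · intro x; rw [hmemkeys]
      constructor
      · rintro (rfl | hx)
        · exact (hI.mem x).mp hchd
        · exact (hI.mem x).mp hx
      · intro hx; right; exact (hI.mem x).mpr hx
    · rw [PySem.Dict.keys_insert_of_contains d _ (((PySem.Dict.contains_iff_mem_keys) d ch).mpr hchd)]
      exact hI.knodup
    · intro x hx
      rw [hmemkeys] at hx
      by_cases hxch : x = ch
      · subst hxch
        rw [PySem.Dict.get?_insert_self, PySem.Dict.get?_insert_self, hgetD]
      · rw [PySem.Dict.get?_insert d ch x, PySem.Dict.get?_insert sc ch x, if_neg hxch, if_neg hxch]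
        exact hI.agree x (by tauto)
    · intro x hx
      rw [hmemkeys] at hx
      rcases hx with rfl | hx
      · exact hch0
      · exact hI.nonneg x hx
    · intro x hx
      rw [hmemkeys] at hx
      rw [PySem.Dict.getD_insert d ch x]
      by_cases hxch : x = ch
      · rw [if_pos hxch]
        have := hI.pos ch hchd
        omega
      · rw [if_neg hxch]
        exact hI.pos x (by tauto)
    · intro m hc hnk m' hm'
      obtain ⟨hcm, hnm⟩ := hlast m hc hnk
      rw [hmemkeys] at hm'
      rcases hm' with rfl | hm'
      · exact hchpop m hcm hnm
      · exact hI.popped m hcm hnm m' hm'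
    · rw [pv_capD_insert_mem d ch _ hI.knodup hchd]; ring
  · -- fresh child
    have hg' : sc.contains ch = false := by simpa using hg
    have hchd : ch ∉ d.keys := by
      intro hx
      have := hI.agree ch hx
      have h2 : (d.get? ch).isSome = true := (pv_mem_keys_iff_isSome d ch).mp hx
      rw [PySem.Dict.contains_eq_isSome_get?, this] at hg
      exact hg h2
    have hdgetD : d.getD ch 0 = 0 := by
      rw [PySem.Dict.getD, (PySem.Dict.get?_eq_none_iff_not_mem_keys d ch).mpr hchd]
      rfl
    have hscgetD : (sc.insert ch 0).getD ch 0 = 0 := PySem.Dict.getD_insert_self ..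
    have hkeys : (d.insert ch (d.getD ch 0 + w)).keys = d.keys ++ [ch] :=
      PySem.Dict.keys_insert_of_not_contains d _
        (by rw [Bool.eq_false_iff]; intro h; exact hchd (((PySem.Dict.contains_iff_mem_keys) d ch).mp h))
    have hnchpq : (-ch) ∉ pq := by
      intro h
      exact hchd ((hI.mem ch).mpr h)
    simp only [hg', Bool.false_eq_true, if_false] at hlast ⊢
    refine ⟨⟨?_, ?_, ?_, ?_, ?_, ?_, ?_⟩, ?_, hlast⟩
    · rw [List.nodup_append]
      refine ⟨hI.nodup, List.nodup_singleton _, ?_⟩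
      intro a ha b hb
      have hb' : b = -ch := by simpa using hb
      subst hb'
      intro h
      exact hnchpq (h ▸ ha)
    · intro x
      rw [hmemkeys, hI.mem x]
      simp only [List.mem_append, List.mem_cons, List.not_mem_nil, or_false]
      constructor
      · rintro (rfl | hx)
        · right; rfl
        · left; exact hx
      · rintro (hx | hx)
        · right; exact hx
        · left; omega
    · rw [hkeys, List.nodup_append]
      refine ⟨hI.knodup, List.nodup_singleton _, ?_⟩
      intro a ha b hb
      have hb' : b = ch := by simpa using hb
      subst hb'
      intro h
      exact hchd (h ▸ ha)
    · intro x hx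
      rw [hmemkeys] at hx
      by_cases hxch : x = ch
      · subst hxch
        rw [PySem.Dict.get?_insert_self, PySem.Dict.get?_insert_self, hdgetD, hscgetD]
      · rw [PySem.Dict.get?_insert d ch x, if_neg hxch,
            PySem.Dict.get?_insert (sc.insert ch 0) ch x, if_neg hxch,
            PySem.Dict.get?_insert sc ch x, if_neg hxch]
        exact hI.agree x (by tauto)
    · intro x hx
      rw [hmemkeys] at hx
      rcases hx with rfl | hx
      · exact hch0
      · exact hI.nonneg x hx
    · intro x hx
      rw [hmemkeys] at hx
      by_cases hxch : x = ch
      · subst hxch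
        rw [PySem.Dict.getD_insert_self, hdgetD]
        omega
      · rw [PySem.Dict.getD_insert d ch x, if_neg hxch]
        exact hI.pos x (by tauto)
    · intro m hc hnk m' hm'
      obtain ⟨hcm, hnm⟩ := hlast m hc hnk
      rw [hmemkeys] at hm'
      rcases hm' with rfl | hm'
      · exact hchpop m hcm hnm
      · exact hI.popped m hcm hnm m' hm'
    · rw [pv_capD_insert_not_mem d ch _ hchd, hdgetD]; ring

-- A's guard-both-children-then-increment order agrees with the per-child
-- guard/increment order on the level of lookups
theorem pv_even_sc_get? (sc : PySem.Dict Int Int) (ch1 ch2 g : Int) (hne : ch1 ≠ ch2) (x : Int) :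
    (let sc1 := if sc.contains ch1 then sc else sc.insert ch1 0
     let sc2 := if sc1.contains ch2 then sc1 else sc1.insert ch2 0
     let sc3 := sc2.insert ch1 (sc2.getD ch1 0 + g)
     (sc3.insert ch2 (sc3.getD ch2 0 + g)).get? x) =
    (let sc1 := if sc.contains ch1 then sc else sc.insert ch1 0
     let S1 := sc1.insert ch1 (sc1.getD ch1 0 + g)
     let A2 := if S1.contains ch2 then S1 else S1.insert ch2 0
     (A2.insert ch2 (A2.getD ch2 0 + g)).get? x) := by
  simp only []
  have hcne : ch2 ≠ ch1 := fun h => hne h.symm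
  by_cases b1 : sc.contains ch1 = true <;>
    simp only [b1, if_true, if_false, Bool.false_eq_true] <;>
  · rw [show ∀ (s : PySem.Dict Int Int) (v : Int), (s.insert ch1 v).contains ch2 = s.contains ch2 by
      intro s v; rw [PySem.Dict.contains_insert]; simp [hcne]]
    by_cases b2 : sc.contains ch2 = true <;>
      by_cases hx1 : x = ch1 <;> by_cases hx2 : x = ch2 <;>
      simp_all [PySem.Dict.get?_insert, PySem.Dict.getD_insert, PySem.Dict.contains_insert]

-- the bisimulation: related states drive both loops to the same output, for any fuel
theorem pv_loop_eq (fuel : Nat) (pq : List Int) (sc d : PySem.Dict Int Int) (left : Int)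
    (hI : MInv pq sc d) (hcap : left ≤ capD d) :
    solveLoopA fuel pq sc left = solveLoopB fuel d left := by
  induction fuel generalizing pq sc d left with
  | zero => rfl
  | succ f ih =>
    by_cases hpq : pq = []
    · subst hpq
      have hkeys : d.keys = [] := by
        by_contra h
        obtain ⟨x, hx⟩ := List.exists_mem_of_ne_nil _ h
        simpa using (hI.mem x).mp hx
      simp [solveLoopA, solveLoopB, PySem.List.min?, PySem.List.max?, hkeys]
    · obtain ⟨m, hmin⟩ : ∃ m, PySem.List.min? pq (fun x => x) = some m := by
        cases h : PySem.List.min? pq (fun x => x) with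
        | none => exact absurd ((PySem.List.min?_eq_none_iff _ _).mp h) hpq
        | some m => exact ⟨m, rfl⟩
      have hmpq : m ∈ pq := PySem.List.min?_mem hmin
      have hhikey : (-m) ∈ d.keys := (hI.mem (-m)).mpr (by simpa using hmpq)
      have hmax : ∀ x ∈ d.keys, x ≤ -m := by
        intro x hx
        have := PySem.List.min?_isMin hmin (-x) ((hI.mem x).mp hx)
        omega
      have hmaxeq : PySem.List.max? d.keys (fun x => x) = some (-m) :=
        pv_max?_id_of_mem _ _ hhikey hmax
      have hget : d.get? (-m) = some (d.getD (-m) 0) := by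
        cases h : d.get? (-m) with
        | none =>
          exact absurd ((PySem.Dict.get?_eq_none_iff_not_mem_keys d (-m)).mp h)
            (by simpa using hhikey)
        | some v => simp [PySem.Dict.getD, h]
      have hagree : sc.getD (-m) 0 = d.getD (-m) 0 := by
        rw [PySem.Dict.getD, hI.agree (-m) hhikey, ← PySem.Dict.getD]
      have hposg : 1 ≤ d.getD (-m) 0 := hI.pos (-m) hhikey
      have hfd : PySem.Int.floordiv (-m) 2 = (-m) / 2 := by
        simp [PySem.Int.floordiv, Int.fdiv_eq_ediv]
      have hmd : PySem.Int.mod (-m) 2 = (-m) % 2 := by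
        simp [PySem.Int.mod, Int.fmod_eq_emod]
      simp only [solveLoopA, solveLoopB, hmin, hmaxeq, PySem.Dict.pop?, hget, Option.map_some,
        hagree, hfd, hmd]
      set g := d.getD (-m) 0 with hgdef
      by_cases hle : left - g ≤ 0
      · simp [hle]
      · simp only [if_neg hle]
        -- the maximal live length is ≥ 1: the remaining demand still fits into the capacity
        have hcpos : 0 < capD d := by omega
        obtain ⟨x, hxk, hxpos⟩ :=
          pv_sum_pos_mem d.keys (fun y => y * d.getD y 0)
            (fun y hy => mul_nonneg (hI.nonneg y hy) (by have := hI.pos y hy; omega)) hcpos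
        have hx1 : 1 ≤ x := by
          rcases lt_or_eq_of_le (hI.nonneg x hxk) with h | h
          · omega
          · rw [← h] at hxpos; simp at hxpos
        have hhi1 : 1 ≤ -m := le_trans hx1 (hmax x hxk)
        obtain ⟨hImid, hpopmid⟩ := pv_pop_inv pq sc d (-m) hI hhikey hmax
        rw [neg_neg] at hImid
        have hcapmid : capD (d.erase (-m)) = capD d - (-m) * g :=
          pv_capD_erase d (-m) hI.knodup hhikey
        by_cases hodd : (-m) % 2 = 1
        · simp only [if_pos hodd]
          obtain ⟨hI2, hcap2, _⟩ :=
            pv_addchild (pq.erase m) sc (d.erase (-m)) ((-m) / 2) (2 * g) hImid (by omega)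
              (by omega)
              (fun mm hc hnk => lt_of_lt_of_le (by omega) (hpopmid mm hc hnk))
          refine ih _ _ _ _ hI2 ?_
          have h2 : ((-m) / 2) * (2 * g) + g = (-m) * g := by
            have he : 2 * ((-m) / 2) + 1 = -m := by omega
            linear_combination g * he
          rw [hcap2, hcapmid]
          omega
        · simp only [if_neg hodd]
          have hne12 : (-m) / 2 - 1 ≠ (-m) / 2 := by omega
          obtain ⟨hI2, hcap2, hlast2⟩ :=
            pv_addchild (pq.erase m) sc (d.erase (-m)) ((-m) / 2 - 1) g hImid (by omega)
              (by omega)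
              (fun mm hc hnk => lt_of_lt_of_le (by omega) (hpopmid mm hc hnk))
          obtain ⟨hI3, hcap3, _⟩ :=
            pv_addchild _ _ _ ((-m) / 2) g hI2 (by omega) (by omega)
              (fun mm hc hnk => by
                obtain ⟨hcm, hnm⟩ := hlast2 mm hc hnk
                exact lt_of_lt_of_le (by omega) (hpopmid mm hcm hnm))
          -- A guards both children before incrementing; same lookups, same pushes
          have hc2eq : ∀ (v : Int),
              (((if sc.contains ((-m) / 2 - 1) then sc else sc.insert ((-m) / 2 - 1) 0).insert
                ((-m) / 2 - 1) v).contains ((-m) / 2)) =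
              ((if sc.contains ((-m) / 2 - 1) then sc else sc.insert ((-m) / 2 - 1) 0).contains
                ((-m) / 2)) := by
            intro v
            rw [PySem.Dict.contains_insert]
            simp [hne12.symm]
          have hscext := fun x => pv_even_sc_get? sc ((-m) / 2 - 1) ((-m) / 2) g hne12 x
          simp only [] at hscext
          simp only [hc2eq] at hI3 hscext
          have hI4 := pv_MInv_sc_ext _ _ _ _ hI3 hscext
          refine ih _ _ _ _ hI4 ?_
          have h2 : ((-m) / 2 - 1) * g + ((-m) / 2) * g + g = (-m) * g := by
            have he : ((-m) / 2 - 1) + ((-m) / 2) + 1 = -m := by omega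
            linear_combination g * he
          rw [hcap3, hcap2, hcapmid]
          omega

-- with k ≤ 1 the very first pop already seats the k-th person, on both sides
theorem pv_first_return (f : Nat) (n k : Int) (hk : k ≤ 1) :
    solveLoopA (f + 1) [-n] (PySem.Dict.mk [(n, 1)]) k =
      solveLoopB (f + 1) (PySem.Dict.mk [(n, 1)]) k := by
  have hmin1 : PySem.List.min? [-n] (fun x => x) = some (-n) := by
    simp [PySem.List.min?]
  have hmax1 : PySem.List.max? (PySem.Dict.mk [(n, (1:Int))]).keys (fun x => x) = some n := by
    simp [PySem.List.max?, PySem.Dict.keys]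
  have hget1 : (PySem.Dict.mk [(n, (1:Int))]).get? n = some 1 := by
    simp [PySem.Dict.get?]
  have hgd : (PySem.Dict.mk [(n, (1:Int))]).getD n 0 = 1 := by
    simp [PySem.Dict.getD, hget1]
  simp only [solveLoopA, solveLoopB, hmin1, hmax1, PySem.Dict.pop?, hget1, Option.map_some,
    neg_neg, hgd]
  rw [if_pos (by omega : k - 1 ≤ 0), if_pos (by omega : k - 1 ≤ 0)]

theorem solve_spec : Claim_equal_solve := by
  intro n k _ hpre
  unfold Spec_solve
  have hD0 : PySem.Dict.ofList [(n, (1:Int))] = PySem.Dict.mk [(n, 1)] := by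
    simp [PySem.Dict.ofList, PySem.Dict.empty, PySem.Dict.update, PySem.Dict.insert,
      PySem.Dict.contains]
  by_cases hk : k ≤ 1
  · unfold solve solve_alt
    rw [hD0, show n.natAbs + k.natAbs + 4 = (n.natAbs + k.natAbs + 3) + 1 from rfl]
    exact pv_first_return _ n k hk
  · have h2k : 2 ≤ k := by omega
    have hkn : k ≤ n := by rcases hpre with h | h <;> omega
    unfold solve solve_alt
    rw [hD0]
    apply pv_loop_eq
    · refine ⟨?_, ?_, ?_, ?_, ?_, ?_, ?_⟩
      · simp
      · intro x
        simp only [PySem.Dict.keys, List.map_cons, List.map_nil,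
          List.mem_cons, List.not_mem_nil, or_false]
        omega
      · simp [PySem.Dict.keys]
      · intro x _; rfl
      · intro x hx
        have : x = n := by simpa [PySem.Dict.keys] using hx
        omega
      · intro x hx
        have hxn : x = n := by simpa [PySem.Dict.keys] using hx
        subst hxn
        simp [PySem.Dict.getD, PySem.Dict.get?]
      · intro mm hc hnk mm' _
        exfalso
        have : mm = n := by
          have := by simpa [PySem.Dict.contains] using hc
          omega
        subst this
        exact hnk (by simp [PySem.Dict.keys])
    · have hcap0 : capD (PySem.Dict.mk [(n, 1)]) = n := by
        simp [capD, PySem.Dict.keys, PySem.Dict.getD, PySem.Dict.get?]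
      omega
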